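-- pv_equiv track=rewrite | github.com/Muhammad-CS/Missing-Operator-Calculator | Missing Operator Calculator.py | parenthesize
-- ===== SOURCE A (Python) =====
-- def parenthesize(string):
--     operators = ['?']
--     depth = len([s for s in string if s in operators])
--     if depth == 0:
--         return [string]
--     if depth== 1:
--         return ['('+ string + ')']
--     answer = []
--     for index, symbol in enumerate(string):
--         if symbol in operators:
--             left = string[:index]
--             right = string[(index+1):]
--             strings = ['(' + lt + ')' + symbol +'(' + rt + ')'
--                            for lt in parenthesize(left)
--                            for rt in parenthesize(right) ]
--             answer.extend(strings)
--     return answer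
-- ===== SOURCE B (Python) =====
-- def parenthesize(string):
--     tokens = string.split('?')
--     n = len(tokens)
--     dp = {}
--     for i in range(n):
--         dp[(i, i)] = [tokens[i]]
--     for length in range(2, n + 1):
--         for i in range(n - length + 1):
--             j = i + length - 1
--             if length == 2:
--                 dp[(i, j)] = ['(' + tokens[i] + '?' + tokens[j] + ')']
--             else:
--                 cell = []
--                 for k in range(i, j):
--                     for lt in dp[(i, k)]:
--                         for rt in dp[(k + 1, j)]:
--                             cell.append('(' + lt + ')?(' + rt + ')')
--                 dp[(i, j)] = cell
--     return dp[(0, n - 1)]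
-- ===== Notes on version B (the rewrite author's own statement) =====
-- stated objective: faster
-- what changed: A's exponential recursion over the operator positions of repeatedly re-sliced strings (recounting operators and recombining sub-results at every level) is replaced by one tokenizing scan followed by a bottom-up dynamic-programming table dp[(i,j)] over token ranges filled in increasing range length, so each sub-range's list of parenthesizations is computed exactly once.
import Mathlib
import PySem

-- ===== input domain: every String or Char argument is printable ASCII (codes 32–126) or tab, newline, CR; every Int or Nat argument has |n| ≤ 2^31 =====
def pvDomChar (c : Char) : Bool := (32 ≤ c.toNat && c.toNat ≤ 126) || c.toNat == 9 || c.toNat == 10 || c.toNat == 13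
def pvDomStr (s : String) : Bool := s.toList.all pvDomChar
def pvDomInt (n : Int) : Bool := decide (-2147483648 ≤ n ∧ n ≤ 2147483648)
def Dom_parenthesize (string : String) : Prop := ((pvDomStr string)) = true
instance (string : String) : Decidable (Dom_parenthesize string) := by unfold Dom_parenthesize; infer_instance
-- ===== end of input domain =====

-- B replaces A's exponential recursion over '?' positions of ever-resliced strings by a single
-- tokenization pass plus a bottom-up dynamic-programming table over token ranges (objective: faster,
-- each sub-range's list is computed once instead of being recomputed at every enclosing split).

-- ===== PORT A =====
-- A recurses on the string: count '?'s; 0 → [s]; 1 → ['('+s+')']; else for every '?' position,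
-- combine all results of the left slice with all results of the right slice.
def parenACore (s : List Char) : List (List Char) :=
  let depth := (s.filter (fun c => c == '?')).length
  if depth = 0 then [s]
  else if depth = 1 then ['(' :: s ++ [')']]
  else
    (PySem.List.enumerate s 0).attach.foldl
      (fun answer p =>
        if p.1.2 == '?' then
          let left := PySem.List.slice s none (some p.1.1)
          let right := PySem.List.slice s (some (p.1.1 + 1)) none
          answer ++ (parenACore left).flatMap (fun lt =>
            (parenACore right).map (fun rt => '(' :: lt ++ ')' :: p.1.2 :: '(' :: rt ++ [')']))
        else answer) []
termination_by s.length
decreasing_by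
  all_goals
    obtain ⟨k, hk, hp⟩ := (PySem.List.mem_enumerate_iff s 0 p.1).mp p.2
  · have h1 : (p.1.1 : Int) = (k : Int) := by rw [hp]; simp
    have h2 : ((k : Int) + 1) = ((k + 1 : Nat) : Int) := by push_cast; ring
    rw [h1, h2, PySem.List.slice_from_natCast]
    simp; omega
  · have h1 : (p.1.1 : Int) = (k : Int) := by rw [hp]; simp
    rw [h1, PySem.List.slice_to_natCast]
    simp; omega

def parenthesize (string : String) : List String :=
  (parenACore string.toList).map (fun cs => String.ofList cs)

-- ===== PORT B =====
-- B: tokenize once by scanning the characters; then fill a dict dp[(i,j)] (token ranges) by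
-- increasing range length; dp lookups are always present, so dict indexing is ported as getD _ [].
def pvBcore (cs : List Char) : List (List Char) :=
  let st := cs.foldl (fun (st : List (List Char) × List Char) ch =>
      if ch == '?' then (st.1 ++ [st.2], ([] : List Char)) else (st.1, st.2 ++ [ch])) ([], [])
  let tokens := st.1 ++ [st.2]
  let n : Int := tokens.length
  let dp : PySem.Dict (Int × Int) (List (List Char)) :=
    (PySem.List.pyRange 0 n).foldl
      (fun d i => d.insert (i, i) [PySem.List.pyGetD tokens i []]) PySem.Dict.empty
  let dp :=
    (PySem.List.pyRange 2 (n + 1)).foldl (fun d len =>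
      (PySem.List.pyRange 0 (n - len + 1)).foldl (fun d i =>
        let j := i + len - 1
        if len == 2 then
          d.insert (i, j)
            ['(' :: (PySem.List.pyGetD tokens i [] ++ '?' :: PySem.List.pyGetD tokens j []) ++ [')']]
        else
          let cell := (PySem.List.pyRange i j).foldl (fun cell k =>
            (d.getD (i, k) []).foldl (fun cell lt =>
              (d.getD (k + 1, j) []).foldl (fun cell rt =>
                cell ++ ['(' :: lt ++ ')' :: '?' :: '(' :: rt ++ [')']]) cell) cell) []
          d.insert (i, j) cell) d) dp
  dp.getD (0, n - 1) []

def parenthesize_alt (string : String) : List String :=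
  (pvBcore string.toList).map (fun cs => String.ofList cs)

-- ===== PRECONDITION & SPEC =====
def Spec_parenthesize (string : String) (out : List String) : Prop := out = parenthesize_alt string
instance (string : String) (out : List String) : Decidable (Spec_parenthesize string out) := by unfold Spec_parenthesize; infer_instance

-- ===== CLAIM (what is proved, stated in full; the proofs are below) =====
def Claim_equal_parenthesize : Prop := ∀ (string : String), Dom_parenthesize string → Spec_parenthesize string (parenthesize string)

-- ===== LEMMAS AND PROOFS =====

-- join tokens back with '?'
def pvJ : List (List Char) → List Char
  | [] => []
  | [t] => t
  | t :: ts => t ++ '?' :: pvJ ts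

-- specification tokenizer (what B's scanning loop computes)
def pvTok : List Char → List Char → List (List Char)
  | cur, [] => [cur]
  | cur, c :: cs => if c = '?' then cur :: pvTok [] cs else pvTok (cur ++ [c]) cs

def pvCombine (L R : List (List Char)) : List (List Char) :=
  L.flatMap (fun lt => R.map (fun rt => '(' :: lt ++ ')' :: '?' :: '(' :: rt ++ [')']))

-- fuel-indexed common specification of both programs, on the token list
def pvSolveF : Nat → List (List Char) → List (List Char)
  | _, [] => []
  | _, [t] => [t]
  | _, [t1, t2] => ['(' :: (t1 ++ '?' :: t2) ++ [')']]
  | 0, _ => []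
  | f + 1, ts => (List.range' 1 (ts.length - 1)).flatMap
      (fun k => pvCombine (pvSolveF f (ts.take k)) (pvSolveF f (ts.drop k)))

def pvSolve (ts : List (List Char)) : List (List Char) := pvSolveF ts.length ts

def pvSeg (ts : List (List Char)) (i j : Nat) : List (List Char) := (ts.drop i).take (j + 1 - i)

def pvInv (ts : List (List Char)) (d : PySem.Dict (Int × Int) (List (List Char))) (m : Nat) : Prop :=
  ∀ i j : Nat, i ≤ j → j < ts.length → j + 1 - i ≤ m →
    d.getD ((i : Int), (j : Int)) [] = pvSolve (pvSeg ts i j)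

lemma pvSolveF_nil (f : Nat) : pvSolveF f [] = [] := by cases f <;> rfl

lemma pvSolveF_one (f : Nat) (t : List Char) : pvSolveF f [t] = [t] := by cases f <;> rfl

lemma pvSolveF_two (f : Nat) (t1 t2 : List Char) :
    pvSolveF f [t1, t2] = ['(' :: (t1 ++ '?' :: t2) ++ [')']] := by cases f <;> rfl

lemma pvSolveF_big (f : Nat) (t1 t2 t3 : List Char) (rest : List (List Char)) :
    pvSolveF (f + 1) (t1 :: t2 :: t3 :: rest)
    = (List.range' 1 ((t1 :: t2 :: t3 :: rest).length - 1)).flatMap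
        (fun k => pvCombine (pvSolveF f ((t1 :: t2 :: t3 :: rest).take k))
                            (pvSolveF f ((t1 :: t2 :: t3 :: rest).drop k))) := rfl

lemma pvTok_ne_nil (cur cs) : pvTok cur cs ≠ [] := by
  induction cs generalizing cur with
  | nil => simp [pvTok]
  | cons c cs ih =>
    simp only [pvTok]
    split
    · simp
    · exact ih _

lemma pvJ_cons (t : List Char) (ts : List (List Char)) (h : ts ≠ []) :
    pvJ (t :: ts) = t ++ '?' :: pvJ ts := by
  cases ts with
  | nil => exact absurd rfl h
  | cons a l => rfl

lemma pvTok_fold (cs : List Char) : ∀ (toks : List (List Char)) (cur : List Char),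
    (cs.foldl (fun (st : List (List Char) × List Char) ch =>
      if ch == '?' then (st.1 ++ [st.2], ([] : List Char)) else (st.1, st.2 ++ [ch])) (toks, cur)).1
    ++ [(cs.foldl (fun (st : List (List Char) × List Char) ch =>
      if ch == '?' then (st.1 ++ [st.2], ([] : List Char)) else (st.1, st.2 ++ [ch])) (toks, cur)).2]
    = toks ++ pvTok cur cs := by
  induction cs with
  | nil => simp [pvTok]
  | cons c cs ih =>
    intro toks cur
    simp only [List.foldl_cons]
    by_cases hc : c = '?'
    · rw [if_pos (by simp [hc]), ih]
      simp [pvTok, hc]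
    · rw [if_neg (by simp [hc]), ih]
      simp [pvTok, hc]

lemma pvTok_free (cs : List Char) : ∀ (cur : List Char), '?' ∉ cur →
    ∀ t ∈ pvTok cur cs, '?' ∉ t := by
  induction cs with
  | nil => intro cur h t ht; simp [pvTok] at ht; subst ht; exact h
  | cons c cs ih =>
    intro cur h t ht
    simp only [pvTok] at ht
    by_cases hc : c = '?'
    · simp [hc] at ht
      rcases ht with rfl | ht
      · exact h
      · exact ih [] (by simp) t ht
    · simp [hc] at ht
      exact ih (cur ++ [c]) (by simp [h, Ne.symm hc]) t ht

lemma pvTok_join (cs : List Char) : ∀ (cur : List Char), pvJ (pvTok cur cs) = cur ++ cs := by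
  induction cs with
  | nil => intro cur; simp [pvTok, pvJ]
  | cons c cs ih =>
    intro cur
    simp only [pvTok]
    by_cases hc : c = '?'
    · rw [if_pos hc, pvJ_cons _ _ (pvTok_ne_nil _ _), ih []]
      simp [hc]
    · rw [if_neg hc, ih (cur ++ [c])]
      simp

lemma pvJ_count (ts : List (List Char)) (h : ts ≠ []) (hf : ∀ t ∈ ts, '?' ∉ t) :
    ((pvJ ts).filter (fun c => c == '?')).length = ts.length - 1 := by
  induction ts with
  | nil => exact absurd rfl h
  | cons t ts ih =>
    have hft : (t.filter (fun c => c == '?')) = [] := by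
      simp [List.filter_eq_nil_iff]
      intro c hc hcq; exact hf t (by simp) (hcq ▸ hc)
    cases ts with
    | nil => simp [pvJ, hft]
    | cons a l =>
      rw [pvJ_cons _ _ (by simp)]
      have := ih (by simp) (fun x hx => hf x (by simp [hx]))
      simp only [List.filter_append, List.filter_cons, hft]
      simp at this ⊢
      omega

lemma pvJ_split (ts : List (List Char)) : ∀ k : Nat, 1 ≤ k → k < ts.length →
    pvJ ts = pvJ (ts.take k) ++ '?' :: pvJ (ts.drop k) := by
  induction ts with
  | nil => intro k h1 h2; simp at h2
  | cons t ts ih =>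
    intro k h1 h2
    simp only [List.length_cons] at h2
    obtain ⟨k', rfl⟩ : ∃ k', k = k' + 1 := ⟨k - 1, by omega⟩
    have hts : ts ≠ [] := by intro h; subst h; simp at h2
    cases k' with
    | zero =>
      rw [List.take_succ_cons, List.take_zero, List.drop_succ_cons, List.drop_zero,
        pvJ_cons _ _ hts]
      rfl
    | succ k'' =>
      have hlt : k'' + 1 < ts.length := by omega
      have hne : ts.take (k'' + 1) ≠ [] := by
        have hlen : (ts.take (k'' + 1)).length = k'' + 1 := by rw [List.length_take]; omega
        intro hnil; rw [hnil] at hlen; simp at hlen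
      rw [List.take_succ_cons, List.drop_succ_cons, pvJ_cons _ _ hne, pvJ_cons _ _ hts,
        ih (k'' + 1) (by omega) hlt]
      simp

lemma pvScan (ts : List (List Char)) (h0 : ts ≠ []) (hf : ∀ t ∈ ts, '?' ∉ t) :
    ∀ (st : Int) (K : Int × Char → List (List Char)),
    ((PySem.List.enumerate (pvJ ts) st).filter (fun p => p.2 == '?')).flatMap K
    = (List.range' 1 (ts.length - 1)).flatMap
        (fun k => K (st + ((pvJ (ts.take k)).length : Int), '?')) := by
  induction ts with
  | nil => exact absurd rfl h0
  | cons t ts ih =>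
    intro st K
    have hfilt : ∀ (s0 : Int), (PySem.List.enumerate t s0).filter (fun p => p.2 == '?') = [] := by
      intro s0
      rw [List.filter_eq_nil_iff]
      intro p hp
      obtain ⟨k, hk, rfl⟩ := (PySem.List.mem_enumerate_iff t s0 p).mp hp
      simp only [beq_iff_eq]
      intro hq
      exact hf t (by simp) (hq ▸ (t.getElem_mem hk))
    cases ts with
    | nil =>
      simp only [pvJ, List.length_cons, List.length_nil]
      rw [hfilt st]
      simp
    | cons a l =>
      rw [pvJ_cons _ _ (by simp), PySem.List.enumerate_append, List.filter_append, hfilt st,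
        PySem.List.enumerate_cons, List.nil_append, List.filter_cons]
      simp only [beq_self_eq_true, if_pos]
      rw [List.flatMap_cons, ih (by simp) (fun x hx => hf x (by simp [hx])) (st + t.length + 1) K]
      rw [show (t :: a :: l).length - 1 = l.length + 1 by simp,
        show List.range' 1 (l.length + 1) = 1 :: List.range' 2 l.length from rfl,
        List.flatMap_cons]
      congr 1
      rw [show (a :: l).length - 1 = l.length by simp,
        show (2 : Nat) = 1 + 1 from rfl, ← List.map_add_range' (a := 1) 1 l.length 1,
        List.flatMap_map, List.flatMap, List.flatMap]
      congr 1
      apply List.map_congr_left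
      intro k hk
      rw [List.mem_range'_1] at hk
      have hne : (a :: l).take k ≠ [] := by
        have hlt : ((a :: l).take k).length = k := by rw [List.length_take]; simp; omega
        intro hnil; rw [hnil] at hlt; simp at hlt; omega
      rw [show (1 : Nat) + k = k + 1 from Nat.add_comm 1 k, List.take_succ_cons,
        pvJ_cons _ _ hne]
      congr 1
      congr 1
      simp only [List.length_append, List.length_cons]
      push_cast
      ring

lemma pvSolveF_fuel (n : Nat) : ∀ ts : List (List Char), ts.length = n → ∀ f, n ≤ f →
    pvSolveF f ts = pvSolveF n ts := by
  induction n using Nat.strong_induction_on with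
  | _ n ih =>
    intro ts hlen f hf
    match ts with
    | [] => rw [pvSolveF_nil, pvSolveF_nil]
    | [t] => rw [pvSolveF_one, pvSolveF_one]
    | [t1, t2] => rw [pvSolveF_two, pvSolveF_two]
    | t1 :: t2 :: t3 :: rest =>
      simp only [List.length_cons] at hlen
      obtain ⟨f', rfl⟩ : ∃ f', f = f' + 1 := ⟨f - 1, by omega⟩
      obtain ⟨n', rfl⟩ : ∃ n', n = n' + 1 := ⟨n - 1, by omega⟩
      rw [pvSolveF_big, pvSolveF_big, List.flatMap, List.flatMap]
      congr 1
      apply List.map_congr_left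
      intro k hk
      have hk' : 1 ≤ k ∧ k ≤ n' := by
        rw [List.mem_range'_1] at hk
        simp only [List.length_cons] at hk
        omega
      set l := t1 :: t2 :: t3 :: rest with hl
      have h1 : (l.take k).length = k := by
        rw [List.length_take]; simp only [hl, List.length_cons]; try omega
      have h2 : (l.drop k).length = n' + 1 - k := by
        rw [List.length_drop]; simp only [hl, List.length_cons]; try omega
      rw [ih k (by omega) (l.take k) h1 f' (by omega),
          ih k (by omega) (l.take k) h1 n' (by omega),
          ih (n' + 1 - k) (by omega) (l.drop k) h2 f' (by omega),
          ih (n' + 1 - k) (by omega) (l.drop k) h2 n' (by omega)]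

lemma pvSolve_big (l : List (List Char)) (h : 3 ≤ l.length) :
    pvSolve l = (List.range' 1 (l.length - 1)).flatMap
      (fun k => pvCombine (pvSolve (l.take k)) (pvSolve (l.drop k))) := by
  match l, h with
  | t1 :: t2 :: t3 :: rest, _ =>
    show pvSolveF ((t1 :: t2 :: t3 :: rest).length) _ = _
    rw [show (t1 :: t2 :: t3 :: rest).length = (rest.length + 2) + 1 by simp]
    rw [pvSolveF_big, List.flatMap, List.flatMap]
    congr 1
    apply List.map_congr_left
    intro k hk
    rw [List.mem_range'_1] at hk
    simp only [List.length_cons] at hk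
    set l := t1 :: t2 :: t3 :: rest with hl
    have h1 : (l.take k).length = k := by
      rw [List.length_take]; simp only [hl, List.length_cons]; try omega
    have h2 : (l.drop k).length = rest.length + 3 - k := by
      rw [List.length_drop]; simp only [hl, List.length_cons]; try omega
    unfold pvSolve
    rw [pvSolveF_fuel (l.take k).length (l.take k) rfl (rest.length + 2) (by omega),
        pvSolveF_fuel (l.drop k).length (l.drop k) rfl (rest.length + 2) (by omega)]

lemma pvA_main (n : Nat) : ∀ ts : List (List Char), ts.length = n → ts ≠ [] →
    (∀ t ∈ ts, '?' ∉ t) → parenACore (pvJ ts) = pvSolve ts := by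
  induction n using Nat.strong_induction_on with
  | _ n ih =>
    intro ts hlen hne hf
    have hcount := pvJ_count ts hne hf
    match ts with
    | [t] =>
      rw [parenACore]
      rw [if_pos (by simpa using hcount)]
      rfl
    | [t1, t2] =>
      rw [parenACore]
      rw [if_neg (by simp at hcount; omega), if_pos (by simpa using hcount)]
      rfl
    | t1 :: t2 :: t3 :: rest =>
      have h3 : 3 ≤ (t1 :: t2 :: t3 :: rest).length := by simp
      set l := t1 :: t2 :: t3 :: rest with hl
      rw [parenACore]
      rw [if_neg (by rw [hcount]; simp [hl]), if_neg (by rw [hcount]; simp [hl])]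
      simp only []
      rw [List.foldl_attach (l := PySem.List.enumerate (pvJ l) 0)
        (f := fun answer (x : Int × Char) =>
          if (x.2 == '?') = true then
            answer ++ (parenACore (PySem.List.slice (pvJ l) none (some x.1))).flatMap (fun lt =>
              (parenACore (PySem.List.slice (pvJ l) (some (x.1 + 1)) none)).map
                (fun rt => '(' :: lt ++ ')' :: x.2 :: '(' :: rt ++ [')']))
          else answer),
        PySem.List.foldl_if_eq_foldl_filter (fun (x : Int × Char) => x.2 == '?'),
        PySem.List.foldl_append_eq_flatMap, List.nil_append]
      rw [pvScan l (by simp [hl]) hf 0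
        (fun q => (parenACore (PySem.List.slice (pvJ l) none (some q.1))).flatMap (fun lt =>
          (parenACore (PySem.List.slice (pvJ l) (some (q.1 + 1)) none)).map
            (fun rt => '(' :: lt ++ ')' :: q.2 :: '(' :: rt ++ [')'])))]
      rw [pvSolve_big l h3, List.flatMap, List.flatMap]
      congr 1
      apply List.map_congr_left
      intro k hk
      rw [List.mem_range'_1] at hk
      have hkn : 1 ≤ k ∧ k < l.length := by constructor <;> omega
      have hsplit := pvJ_split l k hkn.1 hkn.2
      have htake : (pvJ l).take (pvJ (l.take k)).length = pvJ (l.take k) := by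
        rw [hsplit]; exact List.take_left
      have hdrop : (pvJ l).drop ((pvJ (l.take k)).length + 1) = pvJ (l.drop k) := by
        conv_lhs => rw [hsplit]
        rw [show pvJ (l.take k) ++ '?' :: pvJ (l.drop k)
            = (pvJ (l.take k) ++ ['?']) ++ pvJ (l.drop k) by simp,
          show (pvJ (l.take k)).length + 1 = (pvJ (l.take k) ++ ['?']).length by simp]
        exact List.drop_left
      have hlt : (l.take k).length = k := by rw [List.length_take]; omega
      have hld : (l.drop k).length = l.length - k := by rw [List.length_drop]
      have htne : l.take k ≠ [] := by
        intro h0; rw [h0] at hlt; simp at hlt; omega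
      have hdne : l.drop k ≠ [] := by
        intro h0; rw [h0] at hld; simp at hld; omega
      have hIH1 : parenACore (pvJ (l.take k)) = pvSolve (l.take k) := by
        apply ih (l.take k).length (by omega) _ rfl htne
        intro t ht; exact hf t (List.mem_of_mem_take ht)
      have hIH2 : parenACore (pvJ (l.drop k)) = pvSolve (l.drop k) := by
        apply ih (l.drop k).length (by omega) _ rfl hdne
        intro t ht; exact hf t (List.mem_of_mem_drop ht)
      rw [zero_add, PySem.List.slice_to_natCast, htake,
        show ((pvJ (l.take k)).length : Int) + 1 = (((pvJ (l.take k)).length + 1 : Nat) : Int) by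
          push_cast; ring,
        PySem.List.slice_from_natCast, hdrop, hIH1, hIH2]
      rfl

lemma pvRange_natCast (a b : Nat) :
    PySem.List.pyRange (a : Int) (b : Int) = (List.range' a (b - a)).map (fun k : Nat => (k : Int)) := by
  by_cases h : b ≤ a
  · rw [PySem.List.pyRange_one_eq_nil (by exact_mod_cast h)]
    have : b - a = 0 := by omega
    rw [this]; rfl
  · have hd : b - a ≠ 0 := by omega
    obtain ⟨n, hn⟩ : ∃ n, b - a = n + 1 := ⟨b - a - 1, by omega⟩
    induction n generalizing a with
    | zero =>
      have hb : b = a + 1 := by omega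
      subst hb
      rw [PySem.List.pyRange_one_cons (by omega), PySem.List.pyRange_one_eq_nil (by omega)]
      simp [hn]
    | succ m ih =>
      have hlt : (a : Int) < (b : Int) := by exact_mod_cast (by omega : a < b)
      rw [PySem.List.pyRange_one_cons hlt]
      have ha1 : ((a : Int) + 1) = ((a + 1 : Nat) : Int) := by push_cast; ring
      rw [ha1, ih (a + 1) (by omega) (by omega) (by omega)]
      have h2 : b - a = (b - (a + 1)) + 1 := by omega
      rw [h2, show List.range' a ((b - (a + 1)) + 1) = a :: List.range' (a + 1) (b - (a + 1)) from rfl]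
      simp

lemma pvInit (ts : List (List Char)) (m : Nat) (hm : m ≤ ts.length) :
    ∀ i : Nat, i < m →
      ((PySem.List.pyRange 0 (m : Int)).foldl
        (fun d i => d.insert (i, i) [PySem.List.pyGetD ts i []])
        (PySem.Dict.empty : PySem.Dict (Int × Int) (List (List Char)))).getD ((i : Int), (i : Int)) []
      = [ts.getD i []] := by
  induction m with
  | zero => intro i hi; omega
  | succ m ihm =>
    intro i hi
    rw [show ((m + 1 : Nat) : Int) = (m : Int) + 1 by push_cast; ring,
      PySem.List.pyRange_one_succ_right (by positivity), List.foldl_append, List.foldl_cons,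
      List.foldl_nil, PySem.Dict.getD_insert]
    by_cases hip : i = m
    · rw [if_pos (by rw [hip]), hip, PySem.List.pyGetD_natCast]
    · rw [if_neg (by simp [Prod.ext_iff]; intro h; exact absurd (by exact_mod_cast h) hip)]
      exact ihm (by omega) i (by omega)

lemma pvCell (ts : List (List Char)) (d : PySem.Dict (Int × Int) (List (List Char))) (L i j : Nat)
    (hInv : pvInv ts d L) (h2 : 2 ≤ L) (hij : j = i + L) (hj : j < ts.length) :
    (PySem.List.pyRange (i : Int) (j : Int)).foldl (fun cell k =>
        (d.getD ((i : Int), k) []).foldl (fun cell lt =>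
          (d.getD (k + 1, (j : Int)) []).foldl (fun cell rt =>
            cell ++ ['(' :: lt ++ ')' :: '?' :: '(' :: rt ++ [')']]) cell) cell) []
    = pvSolve (pvSeg ts i j) := by
  have hstep : ∀ (cell : List (List Char)) (k : Int),
      (d.getD ((i : Int), k) []).foldl (fun cell lt =>
        (d.getD (k + 1, (j : Int)) []).foldl (fun cell rt =>
          cell ++ ['(' :: lt ++ ')' :: '?' :: '(' :: rt ++ [')']]) cell) cell
      = cell ++ pvCombine (d.getD ((i : Int), k) []) (d.getD (k + 1, (j : Int)) []) := by
    intro cell k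
    rw [PySem.List.foldl_congr_mem (d.getD ((i : Int), k) []) _
      (fun cell lt => cell ++ (d.getD (k + 1, (j : Int)) []).map
        (fun rt => '(' :: lt ++ ')' :: '?' :: '(' :: rt ++ [')'])) cell
      (fun acc x _ => PySem.List.foldl_append_singleton_eq_map _ _ _),
      PySem.List.foldl_append_eq_flatMap]
    rfl
  rw [PySem.List.foldl_congr_mem (PySem.List.pyRange (i : Int) (j : Int)) _
      (fun cell k => cell ++ pvCombine (d.getD ((i : Int), k) []) (d.getD (k + 1, (j : Int)) []))
      [] (fun acc x _ => hstep acc x),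
    PySem.List.foldl_append_eq_flatMap, List.nil_append]
  have hseglen : (pvSeg ts i j).length = L + 1 := by
    simp only [pvSeg, List.length_take, List.length_drop]
    omega
  have hrange : PySem.List.pyRange (i : Int) (j : Int)
      = (List.range' 0 L).map (fun x => ((i + x : Nat) : Int)) := by
    rw [pvRange_natCast i j, show j - i = L by omega,
      show List.range' i L = (List.range' 0 L).map (fun x => i + x) by
        rw [List.map_add_range']; norm_num,
      List.map_map]
    rfl
  rw [hrange, pvSolve_big (pvSeg ts i j) (by omega), hseglen,
    show L + 1 - 1 = L from rfl,
    show List.range' 1 L = (List.range' 0 L).map (fun x => 1 + x) by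
      rw [List.map_add_range'],
    List.flatMap_map, List.flatMap_map, List.flatMap, List.flatMap]
  congr 1
  apply List.map_congr_left
  intro r hr
  rw [List.mem_range'_1] at hr
  have hr' : r < L := by omega
  have e1 : d.getD ((i : Int), ((i + r : Nat) : Int)) [] = pvSolve (pvSeg ts i (i + r)) :=
    hInv i (i + r) (by omega) (by omega) (by omega)
  have e2 : d.getD (((i + r : Nat) : Int) + 1, (j : Int)) [] = pvSolve (pvSeg ts (i + r + 1) j) := by
    rw [show ((i + r : Nat) : Int) + 1 = ((i + r + 1 : Nat) : Int) by push_cast; ring]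
    exact hInv (i + r + 1) j (by omega) (by omega) (by omega)
  have e3 : (pvSeg ts i j).take (1 + r) = pvSeg ts i (i + r) := by
    simp only [pvSeg, List.take_take]
    congr 1
    omega
  have e4 : (pvSeg ts i j).drop (1 + r) = pvSeg ts (i + r + 1) j := by
    simp only [pvSeg, List.drop_take, List.drop_drop]
    congr 1
    · omega
    · congr 1; omega
  rw [e3, e4, e1, e2]

lemma pvInner (ts : List (List Char)) (L : Nat) (hL : 1 ≤ L) (hLn : L + 1 ≤ ts.length)
    (d : PySem.Dict (Int × Int) (List (List Char))) (hInv : pvInv ts d L) :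
    ∀ M : Nat, M ≤ ts.length - L →
      pvInv ts ((PySem.List.pyRange 0 (M : Int)).foldl
        (fun d i =>
          if (((L + 1 : Nat) : Int) == 2) = true then
            d.insert (i, i + ((L + 1 : Nat) : Int) - 1)
              ['(' :: (PySem.List.pyGetD ts i [] ++ '?' ::
                PySem.List.pyGetD ts (i + ((L + 1 : Nat) : Int) - 1) []) ++ [')']]
          else
            d.insert (i, i + ((L + 1 : Nat) : Int) - 1)
              ((PySem.List.pyRange i (i + ((L + 1 : Nat) : Int) - 1)).foldl (fun cell k =>
                (d.getD (i, k) []).foldl (fun cell lt =>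
                  (d.getD (k + 1, i + ((L + 1 : Nat) : Int) - 1) []).foldl (fun cell rt =>
                    cell ++ ['(' :: lt ++ ')' :: '?' :: '(' :: rt ++ [')']]) cell) cell) [])) d) L ∧
      (∀ i' : Nat, i' < M →
        ((PySem.List.pyRange 0 (M : Int)).foldl
          (fun d i =>
            if (((L + 1 : Nat) : Int) == 2) = true then
              d.insert (i, i + ((L + 1 : Nat) : Int) - 1)
                ['(' :: (PySem.List.pyGetD ts i [] ++ '?' ::
                  PySem.List.pyGetD ts (i + ((L + 1 : Nat) : Int) - 1) []) ++ [')']]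
            else
              d.insert (i, i + ((L + 1 : Nat) : Int) - 1)
                ((PySem.List.pyRange i (i + ((L + 1 : Nat) : Int) - 1)).foldl (fun cell k =>
                  (d.getD (i, k) []).foldl (fun cell lt =>
                    (d.getD (k + 1, i + ((L + 1 : Nat) : Int) - 1) []).foldl (fun cell rt =>
                      cell ++ ['(' :: lt ++ ')' :: '?' :: '(' :: rt ++ [')']]) cell) cell) [])) d).getD
          ((i' : Int), ((i' + L : Nat) : Int)) []
        = pvSolve (pvSeg ts i' (i' + L))) := by
  intro M
  induction M with
  | zero =>
    intro _
    rw [show ((0 : Nat) : Int) = 0 from rfl,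
      PySem.List.pyRange_one_eq_nil (a := 0) (b := 0) (by omega), List.foldl_nil]
    exact ⟨hInv, fun i' hi' => by omega⟩
  | succ M ihM =>
    intro hM
    obtain ⟨ih1, ih2⟩ := ihM (by omega)
    rw [show ((M + 1 : Nat) : Int) = ((M : Nat) : Int) + 1 by push_cast; ring,
      PySem.List.pyRange_one_succ_right (by positivity), List.foldl_append, List.foldl_cons,
      List.foldl_nil]
    rw [show ((M : Nat) : Int) + ((L + 1 : Nat) : Int) - 1 = ((M + L : Nat) : Int) by
      push_cast; ring]
    have hkey : ∀ i' j' : Nat, (i' ≠ M ∨ j' ≠ M + L) →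
        (((i' : Int), (j' : Int)) : Int × Int) ≠ (((M : Nat) : Int), ((M + L : Nat) : Int)) := by
      intro i' j' h hc
      have h1 : ((i' : Int)) = ((M : Nat) : Int) := congrArg Prod.fst hc
      have h2 : ((j' : Int)) = ((M + L : Nat) : Int) := congrArg Prod.snd hc
      have h1' : i' = M := by exact_mod_cast h1
      have h2' : j' = M + L := by exact_mod_cast h2
      tauto
    have hcell : ∀ (new : List (List Char)), new = pvSolve (pvSeg ts M (M + L)) →
        pvInv ts (((PySem.List.pyRange 0 (M : Int)).foldl
          (fun d i =>
            if (((L + 1 : Nat) : Int) == 2) = true then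
              d.insert (i, i + ((L + 1 : Nat) : Int) - 1)
                ['(' :: (PySem.List.pyGetD ts i [] ++ '?' ::
                  PySem.List.pyGetD ts (i + ((L + 1 : Nat) : Int) - 1) []) ++ [')']]
            else
              d.insert (i, i + ((L + 1 : Nat) : Int) - 1)
                ((PySem.List.pyRange i (i + ((L + 1 : Nat) : Int) - 1)).foldl (fun cell k =>
                  (d.getD (i, k) []).foldl (fun cell lt =>
                    (d.getD (k + 1, i + ((L + 1 : Nat) : Int) - 1) []).foldl (fun cell rt =>
                      cell ++ ['(' :: lt ++ ')' :: '?' :: '(' :: rt ++ [')']]) cell) cell) [])) d).insert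
          (((M : Nat) : Int), ((M + L : Nat) : Int)) new) L ∧
        (∀ i' : Nat, i' < M + 1 →
          (((PySem.List.pyRange 0 (M : Int)).foldl
            (fun d i =>
              if (((L + 1 : Nat) : Int) == 2) = true then
                d.insert (i, i + ((L + 1 : Nat) : Int) - 1)
                  ['(' :: (PySem.List.pyGetD ts i [] ++ '?' ::
                    PySem.List.pyGetD ts (i + ((L + 1 : Nat) : Int) - 1) []) ++ [')']]
              else
                d.insert (i, i + ((L + 1 : Nat) : Int) - 1)
                  ((PySem.List.pyRange i (i + ((L + 1 : Nat) : Int) - 1)).foldl (fun cell k =>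
                    (d.getD (i, k) []).foldl (fun cell lt =>
                      (d.getD (k + 1, i + ((L + 1 : Nat) : Int) - 1) []).foldl (fun cell rt =>
                        cell ++ ['(' :: lt ++ ')' :: '?' :: '(' :: rt ++ [')']]) cell) cell) [])) d).insert
            (((M : Nat) : Int), ((M + L : Nat) : Int)) new).getD
              ((i' : Int), ((i' + L : Nat) : Int)) [] = pvSolve (pvSeg ts i' (i' + L))) := by
      intro new hnew
      constructor
      · intro i' j' hij' hj' hsz
        rw [PySem.Dict.getD_insert, if_neg (hkey i' j' (by omega))]
        exact ih1 i' j' hij' hj' hsz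
      · intro i' hi'
        by_cases hiM : i' = M
        · subst hiM
          rw [PySem.Dict.getD_insert, if_pos (by rfl), hnew]
        · rw [PySem.Dict.getD_insert, if_neg (hkey i' (i' + L) (by omega))]
          exact ih2 i' (by omega)
    by_cases hL1 : L = 1
    · subst hL1
      rw [if_pos (by decide)]
      apply hcell
      have hM1 : M + 1 < ts.length := by omega
      have hseg : pvSeg ts M (M + 1) = [ts[M], ts[M + 1]] := by
        simp only [pvSeg, show M + 1 + 1 - M = 2 by omega]
        rw [List.drop_eq_getElem_cons (by omega), List.drop_eq_getElem_cons (by omega)]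
        rfl
      rw [PySem.List.pyGetD_natCast, PySem.List.pyGetD_natCast,
        List.getD_eq_getElem ts [] (by omega), List.getD_eq_getElem ts [] (by omega), hseg]
      rfl
    · rw [if_neg (by simp; omega)]
      apply hcell
      exact pvCell ts _ L M (M + L) ih1 (by omega) rfl (by omega)

lemma pvOuter (ts : List (List Char)) :
    ∀ L : Nat, 1 ≤ L → L ≤ ts.length →
    pvInv ts ((PySem.List.pyRange 2 (((L + 1 : Nat) : Int))).foldl
      (fun d len =>
        (PySem.List.pyRange 0 ((ts.length : Int) - len + 1)).foldl (fun d i =>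
          if (len == 2) = true then
            d.insert (i, i + len - 1)
              ['(' :: (PySem.List.pyGetD ts i [] ++ '?' ::
                PySem.List.pyGetD ts (i + len - 1) []) ++ [')']]
          else
            d.insert (i, i + len - 1)
              ((PySem.List.pyRange i (i + len - 1)).foldl (fun cell k =>
                (d.getD (i, k) []).foldl (fun cell lt =>
                  (d.getD (k + 1, i + len - 1) []).foldl (fun cell rt =>
                    cell ++ ['(' :: lt ++ ')' :: '?' :: '(' :: rt ++ [')']]) cell) cell) [])) d)
      ((PySem.List.pyRange 0 ((ts.length : Int))).foldl
        (fun d i => d.insert (i, i) [PySem.List.pyGetD ts i []])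
        (PySem.Dict.empty : PySem.Dict (Int × Int) (List (List Char))))) L := by
  intro L
  induction L with
  | zero => intro h; omega
  | succ L ihL =>
    intro _ hLn
    by_cases hL0 : L = 0
    · subst hL0
      rw [show ((0 + 1 + 1 : Nat) : Int) = 2 by norm_num,
        PySem.List.pyRange_one_eq_nil (a := 2) (b := 2) (by omega), List.foldl_nil]
      intro i j hij hj hsz
      have hji : j = i := by omega
      subst hji
      rw [pvInit ts ts.length (le_refl _) j hj]
      have hseg : pvSeg ts j j = [ts[j]] := by
        simp only [pvSeg, show j + 1 - j = 1 by omega]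
        rw [List.drop_eq_getElem_cons (by omega)]
        rfl
      rw [hseg, List.getD_eq_getElem ts [] (by omega)]
      rfl
    · have hIH := ihL (by omega) (by omega)
      rw [show ((L + 1 + 1 : Nat) : Int) = ((L + 1 : Nat) : Int) + 1 by push_cast; ring,
        PySem.List.pyRange_one_succ_right (by push_cast; omega), List.foldl_append,
        List.foldl_cons, List.foldl_nil]
      rw [show (ts.length : Int) - ((L + 1 : Nat) : Int) + 1 = ((ts.length - L : Nat) : Int) by
        push_cast [Nat.cast_sub (by omega : L ≤ ts.length)]; ring]
      obtain ⟨h1, h2⟩ := pvInner ts L (by omega) (by omega) _ hIH (ts.length - L) (le_refl _)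
      intro i j hij hj hsz
      by_cases hsmall : j + 1 - i ≤ L
      · exact h1 i j hij hj hsmall
      · have hjiL : j = i + L := by omega
        subst hjiL
        exact h2 i (by omega)

lemma pvB_main (cs : List Char) : pvBcore cs = pvSolve (pvTok [] cs) := by
  have htok := pvTok_fold cs [] []
  rw [List.nil_append] at htok
  have hlen : 1 ≤ (pvTok [] cs).length := by
    cases h : pvTok [] cs with
    | nil => exact absurd h (pvTok_ne_nil [] cs)
    | cons a l => simp
  unfold pvBcore
  simp only []
  rw [htok]
  have hInv := pvOuter (pvTok [] cs) (pvTok [] cs).length (by omega) (le_refl _)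
  rw [show (((pvTok [] cs).length : Int) + 1) = (((pvTok [] cs).length + 1 : Nat) : Int) by
    push_cast; ring]
  have hfin := hInv 0 ((pvTok [] cs).length - 1) (by omega) (by omega) (by omega)
  rw [Nat.cast_zero] at hfin
  rw [show (((pvTok [] cs).length : Int) - 1) = (((pvTok [] cs).length - 1 : Nat) : Int) by
    push_cast [Nat.cast_sub (by omega : 1 ≤ (pvTok [] cs).length)]; ring]
  rw [hfin]
  congr 1
  simp only [pvSeg, List.drop_zero]
  rw [show (pvTok [] cs).length - 1 + 1 - 0 = (pvTok [] cs).length by omega]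
  exact List.take_length

lemma pvCore_eq (cs : List Char) : parenACore cs = pvBcore cs := by
  have hJ : pvJ (pvTok [] cs) = cs := pvTok_join cs []
  have hne : pvTok [] cs ≠ [] := pvTok_ne_nil [] cs
  have hf : ∀ t ∈ pvTok [] cs, '?' ∉ t := pvTok_free cs [] (by simp)
  calc parenACore cs = parenACore (pvJ (pvTok [] cs)) := by rw [hJ]
    _ = pvSolve (pvTok [] cs) := pvA_main (pvTok [] cs).length _ rfl hne hf
    _ = pvBcore cs := (pvB_main cs).symm

-- ===== VERDICT (by name: the statement is the Claim_ definition above) =====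
theorem parenthesize_spec : Claim_equal_parenthesize := by
  intro s _
  unfold Spec_parenthesize parenthesize parenthesize_alt
  rw [pvCore_eq]
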